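-- pv_equiv track=rewrite | github.com/ttc24/Patchwork-Isles-Beta | engine/engine_min.py | format_reputation_display
-- ===== SOURCE A (Python) =====
-- REPUTATION_TIERS = [
--     (-10, -8, "Nemesis"),
--     (-7, -5, "Hated"),
--     (-4, -2, "Wary"),
--     (-1, 1, "Neutral"),
--     (2, 4, "Favored"),
--     (5, 7, "Trusted"),
--     (8, 10, "Exalted"),
-- ]
--
-- def rep_tier_label(value, tiers=REPUTATION_TIERS):
--     try:
--         rep_value = int(value)
--     except (TypeError, ValueError):
--         rep_value = 0
--     for low, high, label in tiers:
--         if low <= rep_value <= high: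
--             return label
--     if tiers:
--         return tiers[0][2] if rep_value < tiers[0][0] else tiers[-1][2]
--     return "Neutral"
--
-- def format_reputation_display(rep_map):
--     if not isinstance(rep_map, dict) or not rep_map:
--         return "—"
--     parts = []
--     for faction, value in sorted(rep_map.items()):
--         try:
--             rep_value = int(value)
--         except (TypeError, ValueError):
--             rep_value = 0
--         label = rep_tier_label(rep_value)
--         parts.append(f"{faction}: {label} ({rep_value:+d})")
--     return ", ".join(parts)
-- ===== SOURCE B (Python) =====
-- def format_reputation_display(rep_map):
--     if not isinstance(rep_map, dict) or not rep_map: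
--         return "—"
--     labels = ["Nemesis", "Hated", "Wary", "Neutral", "Favored", "Trusted", "Exalted"]
--
--     def fmt(faction, value):
--         rep = int(value)
--         return f"{faction}: {labels[max(0, min(6, (rep + 10) // 3))]} ({rep:+d})"
--
--     return ", ".join(fmt(f, v) for f, v in sorted(rep_map.items()))
-- ===== Notes on version B (the rewrite author's own statement) =====
-- stated objective: simpler
-- what changed: Replaces the linear scan over REPUTATION_TIERS (plus its below/above fallback branch) with a closed-form clamped index max(0, min(6, (rep+10)//3)) into a fixed label list, and builds the output by a join over a generator instead of an explicit parts-accumulator loop.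
import Mathlib
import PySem

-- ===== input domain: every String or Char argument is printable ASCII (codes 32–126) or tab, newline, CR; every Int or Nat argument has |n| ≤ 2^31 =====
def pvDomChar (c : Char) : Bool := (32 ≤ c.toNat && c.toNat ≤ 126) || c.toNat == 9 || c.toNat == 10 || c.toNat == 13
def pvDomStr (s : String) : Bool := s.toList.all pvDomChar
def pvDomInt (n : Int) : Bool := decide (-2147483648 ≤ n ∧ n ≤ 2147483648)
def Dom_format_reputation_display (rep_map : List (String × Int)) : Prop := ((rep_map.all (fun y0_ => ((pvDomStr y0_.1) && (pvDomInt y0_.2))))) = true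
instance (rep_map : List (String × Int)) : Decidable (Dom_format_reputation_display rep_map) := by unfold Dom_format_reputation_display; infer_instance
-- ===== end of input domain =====

-- B inlines the tier lookup as a closed-form clamped index into a fixed label list and joins a map,
-- instead of A's linear scan over the tier table inside an accumulator loop (objective: simpler).


-- port of the f-string conversion '{:+d}' (exact for ints: '+' prefix for n ≥ 0, str(n) otherwise); shared primitive
def pvFmtPlus (n : Int) : String := (if 0 ≤ n then "+" else "") ++ PySem.Int.toStr n

-- ===== PORT A =====
-- the module constant REPUTATION_TIERS
def pvTiers : List (Int × Int × String) :=
  [(-10, -8, "Nemesis"), (-7, -5, "Hated"), (-4, -2, "Wary"), (-1, 1, "Neutral"),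
   (2, 4, "Favored"), (5, 7, "Trusted"), (8, 10, "Exalted")]

-- the 'for low, high, label in tiers' scan (returns none when the loop falls through)
def pvScan (v : Int) : List (Int × Int × String) → Option String
  | [] => none
  | (lo, hi, lab) :: rest => if lo ≤ v ∧ v ≤ hi then some lab else pvScan v rest

-- rep_tier_label(value) for an int value (int(value) is the identity; tiers = REPUTATION_TIERS is
-- nonempty, tiers[0][0] = -10, tiers[0][2] = "Nemesis", tiers[-1][2] = "Exalted")
def rep_tier_label (v : Int) : String :=
  match pvScan v pvTiers with
  | some lab => lab
  | none => if v < -10 then "Nemesis" else "Exalted"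

def format_reputation_display (rep_map : List (String × Int)) : String :=
  let d := PySem.Dict.ofList rep_map
  if d.items = [] then "—"
  else
    let parts := (PySem.List.sorted2 d.items (fun p => p.1) (fun p => p.2)).foldl
      (fun parts p =>
        parts ++ [p.1 ++ ": " ++ rep_tier_label p.2 ++ " (" ++ pvFmtPlus p.2 ++ ")"]) []
    PySem.Str.join ", " parts

-- ===== PORT B =====
def pvLabels : List String :=
  ["Nemesis", "Hated", "Wary", "Neutral", "Favored", "Trusted", "Exalted"]

def format_reputation_display_alt (rep_map : List (String × Int)) : String :=
  let d := PySem.Dict.ofList rep_map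
  if d.items = [] then "—"
  else
    PySem.Str.join ", "
      ((PySem.List.sorted2 d.items (fun p => p.1) (fun p => p.2)).map
        (fun p =>
          p.1 ++ ": " ++
            PySem.List.pyGetD pvLabels (max 0 (min 6 (PySem.Int.floordiv (p.2 + 10) 3))) "" ++
            " (" ++ pvFmtPlus p.2 ++ ")"))

-- ===== PRECONDITION & SPEC =====
def Spec_format_reputation_display (rep_map : List (String × Int)) (out : String) : Prop := out = format_reputation_display_alt rep_map
instance (rep_map : List (String × Int)) (out : String) : Decidable (Spec_format_reputation_display rep_map out) := by unfold Spec_format_reputation_display; infer_instance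

-- ===== CLAIM (what is proved, stated in full; the proofs are below) =====
def Claim_equal_format_reputation_display : Prop := ∀ (rep_map : List (String × Int)), Dom_format_reputation_display rep_map → Spec_format_reputation_display rep_map (format_reputation_display rep_map)

-- ===== LEMMAS AND PROOFS =====

-- A's tier scan as a flat band chain
theorem pv_label_cases (v : Int) : rep_tier_label v =
    if v ≤ -8 then "Nemesis" else if v ≤ -5 then "Hated" else if v ≤ -2 then "Wary"
    else if v ≤ 1 then "Neutral" else if v ≤ 4 then "Favored" else if v ≤ 7 then "Trusted"
    else "Exalted" := by
  simp only [rep_tier_label, pvScan, pvTiers]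
  split_ifs <;> first | rfl | omega

-- B's clamped closed-form index selects the same band label
theorem pv_alt_label_cases (v : Int) :
    PySem.List.pyGetD pvLabels (max 0 (min 6 (PySem.Int.floordiv (v + 10) 3))) "" =
    if v ≤ -8 then "Nemesis" else if v ≤ -5 then "Hated" else if v ≤ -2 then "Wary"
    else if v ≤ 1 then "Neutral" else if v ≤ 4 then "Favored" else if v ≤ 7 then "Trusted"
    else "Exalted" := by
  have hdm := PySem.Int.floordiv_mul_add_mod (v + 10) 3
  have h0 : (0 : Int) ≤ PySem.Int.mod (v + 10) 3 := PySem.Int.mod_nonneg _ (by norm_num)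
  have h3 : PySem.Int.mod (v + 10) 3 < 3 := PySem.Int.mod_lt _ (by norm_num)
  set q := PySem.Int.floordiv (v + 10) 3 with hq
  by_cases c0 : v ≤ -8
  · have : max 0 (min 6 q) = 0 := by omega
    rw [this]; simp [c0]; rfl
  · by_cases c1 : v ≤ -5
    · have : max 0 (min 6 q) = 1 := by omega
      rw [this]; simp [c0, c1]; rfl
    · by_cases c2 : v ≤ -2
      · have : max 0 (min 6 q) = 2 := by omega
        rw [this]; simp [c0, c1, c2]; rfl
      · by_cases c3 : v ≤ 1
        · have : max 0 (min 6 q) = 3 := by omega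
          rw [this]; simp [c0, c1, c2, c3]; rfl
        · by_cases c4 : v ≤ 4
          · have : max 0 (min 6 q) = 4 := by omega
            rw [this]; simp [c0, c1, c2, c3, c4]; rfl
          · by_cases c5 : v ≤ 7
            · have : max 0 (min 6 q) = 5 := by omega
              rw [this]; simp [c0, c1, c2, c3, c4, c5]; rfl
            · have : max 0 (min 6 q) = 6 := by omega
              rw [this]; simp [c0, c1, c2, c3, c4, c5]; rfl

theorem pv_label_eq (v : Int) :
    rep_tier_label v =
    PySem.List.pyGetD pvLabels (max 0 (min 6 (PySem.Int.floordiv (v + 10) 3))) "" :=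
  (pv_label_cases v).trans (pv_alt_label_cases v).symm

-- ===== VERDICT (by name: the statement is the Claim_ definition above) =====
theorem format_reputation_display_spec : Claim_equal_format_reputation_display := by
  intro rep_map _
  unfold Spec_format_reputation_display format_reputation_display format_reputation_display_alt
  simp only []
  split
  · rfl
  · rw [PySem.List.foldl_append_singleton_eq_map]
    simp only [List.nil_append]
    congr 1
    apply List.map_congr_left
    intro p _
    rw [pv_label_eq]
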